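-- pv_equiv track=rewrite | github.com/sammystriker/PreDjango-cs108 | CS108/a09/a09_list_comprehensions.py | most_factors
-- ===== SOURCE A (Python) =====
-- def get_factors(n):
--     r = []
--     for i in range(n):
--         if n%(i+1)==0:
--             r.append(i+1)
--     return r
--
-- def most_factors(numbers):
--     mf = 0
--     num = 0
--     for i in numbers:
--         amount = len(get_factors(i))
--         if amount>mf:
--             mf = amount
--             num = i
--     return num
-- ===== SOURCE B (Python) =====
-- def _divisor_count(n):
--     # number of divisors of n, by trial division up to sqrt(n); 0 for n <= 0
--     if n <= 0:
--         return 0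
--     c = 0
--     i = 1
--     while i * i <= n:
--         if n % i == 0:
--             c += 1 if i * i == n else 2
--         i += 1
--     return c
--
-- def most_factors(numbers):
--     best_count = 0
--     best = 0
--     for n in numbers:
--         c = _divisor_count(n)
--         if c > best_count:
--             best_count = c
--             best = n
--     return best
-- ===== Notes on version B (the rewrite author's own statement) =====
-- stated objective: faster
-- what changed: divisor counting scans the full range 1..n in A but B pairs divisors by trial division up to sqrt(n), counting d and n/d together
import Mathlib
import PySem

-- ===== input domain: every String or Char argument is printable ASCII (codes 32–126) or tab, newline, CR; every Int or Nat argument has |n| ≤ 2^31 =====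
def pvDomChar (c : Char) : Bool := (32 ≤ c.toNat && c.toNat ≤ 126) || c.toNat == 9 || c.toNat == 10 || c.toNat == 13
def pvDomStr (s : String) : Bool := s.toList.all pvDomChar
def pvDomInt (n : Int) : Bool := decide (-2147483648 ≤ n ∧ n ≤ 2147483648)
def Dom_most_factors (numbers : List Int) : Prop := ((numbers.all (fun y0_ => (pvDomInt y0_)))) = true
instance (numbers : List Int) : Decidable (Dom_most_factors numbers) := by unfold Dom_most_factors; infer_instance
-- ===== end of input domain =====

-- B replaces A's full divisor scan over 1..n per element by paired trial division up to sqrt(n) (objective: faster).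

-- ===== PORT A =====
def get_factors (n : Int) : List Int :=
  (PySem.List.pyRange 0 n 1).foldl
    (fun r i => if PySem.Int.mod n (i + 1) = 0 then r ++ [i + 1] else r) []

def most_factors (numbers : List Int) : Int :=
  (numbers.foldl
    (fun (st : Int × Int) i =>
      let amount : Int := ((get_factors i).length : Int)
      if amount > st.1 then (amount, i) else st)
    (0, 0)).2

-- ===== PORT B =====
-- the 'while i*i <= n' loop of _divisor_count in Source B (only called with n > 0, hence run on n.toNat)
def divLoop (n i c : Nat) : Nat :=
  if h : i * i ≤ n then
    divLoop n (i + 1) (c + (if n % i = 0 then (if i * i = n then 1 else 2) else 0))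
  else c
termination_by n + 1 - i
decreasing_by
  rcases Nat.eq_zero_or_pos i with h0 | h0
  · omega
  · have : i ≤ i * i := Nat.le_mul_of_pos_left i h0
    omega

def divisor_count (n : Int) : Int :=
  if n ≤ 0 then 0 else (divLoop n.toNat 1 0 : Int)

def most_factors_alt (numbers : List Int) : Int :=
  (numbers.foldl
    (fun (st : Int × Int) n =>
      let c := divisor_count n
      if c > st.1 then (c, n) else st)
    (0, 0)).2

-- ===== PRECONDITION & SPEC =====
def Spec_most_factors (numbers : List Int) (out : Int) : Prop := out = most_factors_alt numbers
instance (numbers : List Int) (out : Int) : Decidable (Spec_most_factors numbers out) := by unfold Spec_most_factors; infer_instance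

-- ===== CLAIM (what is proved, stated in full; the proofs are below) =====
def Claim_equal_most_factors : Prop := ∀ (numbers : List Int), Dom_most_factors numbers → Spec_most_factors numbers (most_factors numbers)

-- ===== LEMMAS AND PROOFS =====

-- the set of divisor pairs {d, m/d} still to be visited when B's loop counter is at i
def smallDiv (m i : Nat) : Finset Nat :=
  (Nat.divisors m).filter (fun d => i ≤ d ∧ i ≤ m / d)

lemma smallDiv_step (m i : Nat) (hm : 0 < m) (hi : 0 < i) (h : i * i ≤ m) :
    (smallDiv m i).card
      = (smallDiv m (i + 1)).card + (if m % i = 0 then (if i * i = m then 1 else 2) else 0) := by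
  have hsub : smallDiv m (i + 1) ⊆ smallDiv m i := by
    intro d hd
    simp only [smallDiv, Finset.mem_filter] at hd ⊢
    exact ⟨hd.1, by omega, by omega⟩
  have hcard := Finset.card_sdiff_add_card_eq_card hsub
  have hile : i ≤ m / i := (Nat.le_div_iff_mul_le hi).2 h
  have hres : smallDiv m i \ smallDiv m (i + 1)
      = if m % i = 0 then (if i * i = m then {i} else {i, m / i}) else ∅ := by
    ext d
    simp only [smallDiv, Finset.mem_sdiff, Finset.mem_filter, Nat.mem_divisors]
    constructor
    · rintro ⟨⟨⟨hd, _⟩, h1, h2⟩, hnot⟩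
      have hnc : ¬(i + 1 ≤ d ∧ i + 1 ≤ m / d) := fun hc => hnot ⟨⟨hd, hm.ne'⟩, hc⟩
      have : d = i ∨ m / d = i := by omega
      rcases this with rfl | hdi
      · have hmod : m % d = 0 := Nat.dvd_iff_mod_eq_zero.mp hd
        simp [hmod]
        split <;> simp
      · have hdvd : i ∣ m := hdi ▸ Nat.div_dvd_of_dvd hd
        have hmod : m % i = 0 := Nat.dvd_iff_mod_eq_zero.mp hdvd
        have hdm : d = m / i := by
          rw [← hdi, Nat.div_div_self hd hm.ne']
        simp only [hmod, if_true, hdm]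
        by_cases hsq : i * i = m
        · have : m / i = i := by
            rw [← hsq, Nat.mul_div_cancel_left i hi]
          simp [hsq, this]
        · simp [hsq]
    · intro hd
      by_cases hmod : m % i = 0
      · have hdvd : i ∣ m := Nat.dvd_of_mod_eq_zero hmod
        simp only [hmod, if_true] at hd
        have hmi : m / i ∣ m := Nat.div_dvd_of_dvd hdvd
        have hii : m / (m / i) = i := Nat.div_div_self hdvd hm.ne'
        by_cases hsq : i * i = m
        · simp only [hsq, if_true, Finset.mem_singleton] at hd
          subst hd
          exact ⟨⟨⟨hdvd, hm.ne'⟩, le_refl _, hile⟩, fun hc => by omega⟩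
        · simp only [hsq, if_false, Finset.mem_insert, Finset.mem_singleton] at hd
          rcases hd with rfl | rfl
          · exact ⟨⟨⟨hdvd, hm.ne'⟩, le_refl _, hile⟩, fun hc => by omega⟩
          · refine ⟨⟨⟨hmi, hm.ne'⟩, hile, ?_⟩, ?_⟩
            · rw [hii]
            · rw [not_and, hii]
              intro _
              omega
      · simp only [hmod, if_false] at hd
        exact absurd hd (Finset.notMem_empty d)
  rw [hres] at hcard
  by_cases hmod : m % i = 0
  · have hdvd : i ∣ m := Nat.dvd_of_mod_eq_zero hmod
    by_cases hsq : i * i = m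
    · simp only [hmod, if_true, hsq, Finset.card_singleton] at hcard ⊢
      omega
    · have hine : i ≠ m / i := by
        intro he
        apply hsq
        conv_rhs => rw [← Nat.div_mul_cancel hdvd, ← he]
      simp only [hmod, if_true, hsq, if_false] at hcard ⊢
      rw [Finset.card_insert_of_notMem (by simpa using hine), Finset.card_singleton] at hcard
      omega
  · simp only [hmod, if_false, Finset.card_empty] at hcard ⊢
    omega

lemma smallDiv_empty (m i : Nat) (h : m < i * i) : smallDiv m i = ∅ := by
  ext d
  simp only [smallDiv, Finset.mem_filter, Nat.mem_divisors, Finset.notMem_empty, iff_false]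
  rintro ⟨⟨hd, hm⟩, h1, h2⟩
  have := Nat.mul_le_mul h1 h2
  rw [Nat.mul_div_cancel' hd] at this
  omega

lemma smallDiv_one (m : Nat) (hm : 0 < m) : smallDiv m 1 = Nat.divisors m := by
  unfold smallDiv
  apply Finset.filter_true_of_mem
  intro d hd
  rw [Nat.mem_divisors] at hd
  have h1 : 0 < d := Nat.pos_of_dvd_of_pos hd.1 hm
  exact ⟨h1, Nat.div_pos (Nat.le_of_dvd hm hd.1) h1⟩

lemma divLoop_eq (m : Nat) (hm : 0 < m) :
    ∀ i c, 0 < i → divLoop m i c = c + (smallDiv m i).card := by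
  have key : ∀ k i c, 0 < i → m + 1 - i ≤ k → divLoop m i c = c + (smallDiv m i).card := by
    intro k
    induction k with
    | zero =>
      intro i c hi hk
      have hii : i ≤ i * i := Nat.le_mul_of_pos_left i hi
      rw [divLoop, dif_neg (by omega), smallDiv_empty m i (by omega)]
      simp
    | succ k ih =>
      intro i c hi hk
      rw [divLoop]
      split
      case isTrue h =>
        have hle : i ≤ m := le_trans (Nat.le_mul_of_pos_left i hi) h
        rw [ih (i + 1) _ (by omega) (by omega), smallDiv_step m i hm hi h]
        omega
      case isFalse h =>
        rw [smallDiv_empty m i (by omega)]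
        simp
  intro i c hi
  exact key (m + 1 - i) i c hi le_rfl

lemma getFactors_card (m : Nat) (hm : 0 < m) :
    (get_factors (m : Int)).length = (Nat.divisors m).card := by
  unfold get_factors
  rw [PySem.List.foldl_append_ite]
  rw [PySem.List.pyRange_one]
  simp only [sub_zero, Int.toNat_natCast, List.nil_append, List.length_map]
  rw [← List.countP_eq_length_filter, List.countP_map]
  have hfun : ((fun x => decide (PySem.Int.mod (↑m) (x + 1) = 0)) ∘ fun k : Nat => (0 : Int) + ↑k)
      = fun k : Nat => decide (m % (k + 1) = 0) := by
    funext k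
    simp only [Function.comp_apply, zero_add]
    have h1 : ((k : Int) + 1) = ((k + 1 : Nat) : Int) := by push_cast; ring
    rw [h1, PySem.Int.mod_natCast]
    simp only [Nat.cast_eq_zero]
  rw [hfun]
  have hbridge : List.countP (fun k => decide (m % (k + 1) = 0)) (List.range m)
      = ((Finset.range m).filter (fun k => m % (k + 1) = 0)).card := by
    simp [Finset.range, Multiset.range, Finset.filter, List.countP_eq_length_filter]
  rw [hbridge]
  refine Finset.card_bij' (fun k _ => k + 1) (fun d _ => d - 1) ?_ ?_ ?_ ?_
  · intro k hk
    simp only [Finset.mem_filter, Finset.mem_range] at hk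
    exact Nat.mem_divisors.2 ⟨Nat.dvd_of_mod_eq_zero hk.2, hm.ne'⟩
  · intro d hd
    rw [Nat.mem_divisors] at hd
    have h1 : 0 < d := Nat.pos_of_dvd_of_pos hd.1 hm
    have h2 : d ≤ m := Nat.le_of_dvd hm hd.1
    simp only [Finset.mem_filter, Finset.mem_range]
    constructor
    · omega
    · have : m % d = 0 := Nat.dvd_iff_mod_eq_zero.mp hd.1
      rwa [Nat.sub_add_cancel h1]
  · intro k hk
    show k + 1 - 1 = k
    omega
  · intro d hd
    rw [Nat.mem_divisors] at hd
    have h1 : 0 < d := Nat.pos_of_dvd_of_pos hd.1 hm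
    show d - 1 + 1 = d
    omega

lemma count_eq (n : Int) : ((get_factors n).length : Int) = divisor_count n := by
  by_cases hn : n ≤ 0
  · unfold get_factors divisor_count
    rw [PySem.List.pyRange_one_eq_nil (by omega)]
    simp [hn]
  · have hm : 0 < n.toNat := by omega
    have hcast : ((n.toNat : Nat) : Int) = n := by omega
    rw [divisor_count, if_neg hn, ← hcast, getFactors_card n.toNat hm, Int.toNat_natCast,
      divLoop_eq n.toNat hm 1 0 (by omega), smallDiv_one n.toNat hm]
    simp

-- ===== VERDICT (by name: the statement is the Claim_ definition above) =====
theorem most_factors_spec : Claim_equal_most_factors := by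
  intro numbers _
  unfold Spec_most_factors most_factors most_factors_alt
  congr 1
  apply PySem.List.foldl_congr_mem
  intro acc x _
  simp only [count_eq]
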